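-- pv_equiv track=rewrite | github.com/2025-II-Infra-ADAII/proyecto-i-ada-ii-return-sinesperanza | project1_ada2/script_evidencia_simple.py | roFB
-- ===== SOURCE A (Python) =====
-- from itertools import permutations
--
-- def costo_total(finca, orden):
--     tiempo = 0
--     costo = 0
--     for idx in orden:
--         ts, tr, p = finca[idx]
--         fin_riego = tiempo + tr
--         retraso = max(0, fin_riego - ts)
--         costo += p * retraso
--         tiempo = fin_riego
--     return costo
--
-- def roFB(finca):
--     """Fuerza Bruta"""
--     n = len(finca)
--     mejor_orden = None
--     mejor_costo = float('inf')
--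
--     for perm in permutations(range(n)):
--         costo = costo_total(finca, list(perm))
--         if costo < mejor_costo:
--             mejor_costo = costo
--             mejor_orden = list(perm)
--
--     return mejor_orden, mejor_costo
-- ===== SOURCE B (Python) =====
-- from functools import lru_cache
--
-- def roFB(finca):
--     """Held-Karp top-down subset DP: the penalty of the next job depends only on the
--     elapsed time, which is determined by the SET of jobs already scheduled, so the
--     optimum over all n! orders is computed over 2^n remaining-subsets.  Scanning the
--     remaining indices in increasing order with a strict-improvement update reconstructs
--     the lexicographically smallest optimal order (the one brute force returns)."""
--     @lru_cache(maxsize=None)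
--     def best(rem, t):
--         # rem: sorted tuple of not-yet-scheduled indices; t: elapsed time.
--         if not rem:
--             return (), 0
--         best_order, best_cost = None, None
--         for i, j in enumerate(rem):
--             ts, tr, p = finca[j]
--             fin = t + tr
--             sub_order, sub_cost = best(rem[:i] + rem[i + 1:], fin)
--             cost = p * max(0, fin - ts) + sub_cost
--             if best_cost is None or cost < best_cost:
--                 best_order, best_cost = (j,) + sub_order, cost
--         return best_order, best_cost
--     order, cost = best(tuple(range(len(finca))), 0)
--     return list(order), cost
-- ===== Notes on version B (the rewrite author's own statement) =====
-- stated objective: faster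
-- what changed: Replaced the O(n!) scan over all permutations with a memoized Held-Karp subset DP (elapsed time is determined by the set of jobs already scheduled), reconstructing the lexicographically smallest optimal order by scanning remaining indices in increasing order with strict-improvement updates.
import Mathlib
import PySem

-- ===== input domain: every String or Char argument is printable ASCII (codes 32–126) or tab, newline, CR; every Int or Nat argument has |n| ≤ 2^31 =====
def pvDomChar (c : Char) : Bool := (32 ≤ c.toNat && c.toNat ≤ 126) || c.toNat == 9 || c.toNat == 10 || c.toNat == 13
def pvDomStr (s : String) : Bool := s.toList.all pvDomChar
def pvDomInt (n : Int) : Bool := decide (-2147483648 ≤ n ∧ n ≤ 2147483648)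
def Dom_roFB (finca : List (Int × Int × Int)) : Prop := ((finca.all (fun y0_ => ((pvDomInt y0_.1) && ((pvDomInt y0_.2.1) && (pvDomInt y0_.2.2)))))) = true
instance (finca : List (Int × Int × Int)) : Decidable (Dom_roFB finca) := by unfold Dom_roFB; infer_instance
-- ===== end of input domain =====

-- B replaces A's O(n!) permutation scan with a Held-Karp subset DP that reconstructs the
-- lexicographically smallest optimal order; a timing run measured it faster (asymptotic).

-- Shared small helper: all ways to pick one element out of a list, in position order,
-- paired with the remaining list.  pvSelections l = [(l[i], l[:i]+l[i+1:]) for i in range(len l)].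
def pvSelections : List Int → List (Int × List Int)
  | [] => []
  | x :: xs => (x, xs) :: (pvSelections xs).map (fun jr => (jr.1, x :: jr.2))

-- ===== PORT A =====
-- costo_total: fold over the order with state (tiempo, costo).  finca[idx] is always in
-- range when idx comes from a permutation of range(n), so pyGetD's default is unreachable.
def costo_total (finca : List (Int × Int × Int)) (orden : List Int) : Int :=
  (orden.foldl
    (fun (st : Int × Int) idx =>
      let v := PySem.List.pyGetD finca idx (0, 0, 0)
      let fin_riego := st.1 + v.2.1
      (fin_riego, st.2 + v.2.2 * max 0 (fin_riego - v.1)))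
    (0, 0)).2

-- itertools.permutations(l) for a duplicate-free input l (range(n) here): all permutations
-- in the itertools order, i.e. for each element in position order, that element first
-- followed by the permutations of the rest.  Fuel = l.length (structural recursion device;
-- at fuel = length the zero-fuel branch is unreachable).
def pvPermsF : Nat → List Int → List (List Int)
  | _, [] => [[]]
  | 0, _ :: _ => [[]]
  | k + 1, x :: xs =>
      (pvSelections (x :: xs)).flatMap (fun jr => (pvPermsF k jr.2).map (jr.1 :: ·))

def pyPermutations (l : List Int) : List (List Int) := pvPermsF l.length l

-- A: brute force.  The (None, float('inf')) initial state is modelled by Option: the first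
-- permutation always wins against inf; the final none is unreachable (≥ 1 permutation).
def roFB (finca : List (Int × Int × Int)) : List Int × Int :=
  let n := finca.length
  ((pyPermutations (PySem.List.pyRange 0 (n : Int) 1)).foldl
    (fun (acc : Option (List Int × Int)) perm =>
      let costo := costo_total finca perm
      match acc with
      | none => some (perm, costo)
      | some (bo, bc) => if costo < bc then some (perm, costo) else some (bo, bc))
    none).getD ([], 0)

-- ===== PORT B =====
-- best(rem, t): minimum penalty (with its lexicographically smallest order) for scheduling
-- the remaining indices rem starting at elapsed time t.  Source B's enumerate + rem[:i]+rem[i+1:]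
-- loop is pvSelections; Source B's lru_cache only caches the same values, so the plain recursion
-- computes the identical result.  Fuel = rem.length (zero-fuel branch unreachable).
def pvBestF (finca : List (Int × Int × Int)) : Nat → List Int → Int → List Int × Int
  | _, [], _ => ([], 0)
  | 0, _ :: _, _ => ([], 0)
  | k + 1, x :: xs, t =>
      ((pvSelections (x :: xs)).foldl
        (fun (acc : Option (List Int × Int)) jr =>
          let v := PySem.List.pyGetD finca jr.1 (0, 0, 0)
          let fin := t + v.2.1
          let sub := pvBestF finca k jr.2 fin
          let cost := v.2.2 * max 0 (fin - v.1) + sub.2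
          match acc with
          | none => some (jr.1 :: sub.1, cost)
          | some (bo, bc) => if cost < bc then some (jr.1 :: sub.1, cost) else some (bo, bc))
        none).getD ([], 0)

def roFB_alt (finca : List (Int × Int × Int)) : List Int × Int :=
  pvBestF finca finca.length (PySem.List.pyRange 0 (finca.length : Int) 1) 0

-- ===== PRECONDITION & SPEC =====
def Spec_roFB (finca : List (Int × Int × Int)) (out : List Int × Int) : Prop := out = roFB_alt finca
instance (finca : List (Int × Int × Int)) (out : List Int × Int) : Decidable (Spec_roFB finca out) := by unfold Spec_roFB; infer_instance

-- ===== CLAIM (what is proved, stated in full; the proofs are below) =====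
def Claim_equal_roFB : Prop := ∀ (finca : List (Int × Int × Int)), Dom_roFB finca → Spec_roFB finca (roFB finca)

-- ===== LEMMAS AND PROOFS =====

-- Proof-side names for the fold steps and loop bodies (definitionally the ports' inline lambdas).
def pvAStep (finca : List (Int × Int × Int)) (st : Int × Int) (idx : Int) : Int × Int :=
  let v := PySem.List.pyGetD finca idx (0, 0, 0)
  let fin_riego := st.1 + v.2.1
  (fin_riego, st.2 + v.2.2 * max 0 (fin_riego - v.1))

def pvStepM (f : List Int → Int) (acc : Option (List Int × Int)) (o : List Int) :
    Option (List Int × Int) :=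
  let costo := f o
  match acc with
  | none => some (o, costo)
  | some (bo, bc) => if costo < bc then some (o, costo) else some (bo, bc)

def pvStepB (finca : List (Int × Int × Int)) (k : Nat) (t : Int)
    (acc : Option (List Int × Int)) (jr : Int × List Int) : Option (List Int × Int) :=
  let v := PySem.List.pyGetD finca jr.1 (0, 0, 0)
  let fin := t + v.2.1
  let sub := pvBestF finca k jr.2 fin
  let cost := v.2.2 * max 0 (fin - v.1) + sub.2
  match acc with
  | none => some (jr.1 :: sub.1, cost)
  | some (bo, bc) => if cost < bc then some (jr.1 :: sub.1, cost) else some (bo, bc)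

-- cost of an order starting at elapsed time t
def pvCostFrom (finca : List (Int × Int × Int)) (t : Int) (orden : List Int) : Int :=
  (orden.foldl (pvAStep finca) (t, 0)).2

lemma pvCost_shift (finca : List (Int × Int × Int)) (l : List Int) :
    ∀ t c, (l.foldl (pvAStep finca) (t, c)).2 = c + pvCostFrom finca t l := by
  induction l with
  | nil => intro t c; simp [pvCostFrom]
  | cons j l ih =>
      intro t c
      have h1 : ∀ c', pvAStep finca (t, c') j =
          (t + (PySem.List.pyGetD finca j (0,0,0)).2.1,
           c' + (PySem.List.pyGetD finca j (0,0,0)).2.2 *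
             max 0 (t + (PySem.List.pyGetD finca j (0,0,0)).2.1 - (PySem.List.pyGetD finca j (0,0,0)).1)) :=
        fun c' => rfl
      have h2 : pvCostFrom finca t (j :: l) =
          (l.foldl (pvAStep finca) (pvAStep finca (t, 0) j)).2 := rfl
      rw [List.foldl_cons, h1, ih, h2, h1, ih]
      ring

lemma pvCostFrom_cons (finca : List (Int × Int × Int)) (t j : Int) (l : List Int) :
    pvCostFrom finca t (j :: l) =
      (PySem.List.pyGetD finca j (0,0,0)).2.2 *
        max 0 (t + (PySem.List.pyGetD finca j (0,0,0)).2.1 - (PySem.List.pyGetD finca j (0,0,0)).1) +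
      pvCostFrom finca (t + (PySem.List.pyGetD finca j (0,0,0)).2.1) l := by
  have h2 : pvCostFrom finca t (j :: l) =
      (l.foldl (pvAStep finca) (pvAStep finca (t, 0) j)).2 := rfl
  rw [h2, show pvAStep finca (t, 0) j =
      (t + (PySem.List.pyGetD finca j (0,0,0)).2.1,
       0 + (PySem.List.pyGetD finca j (0,0,0)).2.2 *
         max 0 (t + (PySem.List.pyGetD finca j (0,0,0)).2.1 - (PySem.List.pyGetD finca j (0,0,0)).1)) from rfl,
    pvCost_shift]
  ring

-- combining: the result of folding a further block into an accumulator
def pvComb (a b : Option (List Int × Int)) : Option (List Int × Int) :=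
  match a, b with
  | a, none => a
  | none, b => b
  | some (bo, bc), some (so, sc) => if sc < bc then some (so, sc) else some (bo, bc)

lemma pvComb_none_left (b : Option (List Int × Int)) : pvComb none b = b := by
  rcases b with _ | ⟨so, sc⟩ <;> rfl

lemma pvComb_none_right (a : Option (List Int × Int)) : pvComb a none = a := by
  rcases a with _ | ⟨bo, bc⟩ <;> rfl

lemma pvComb_step (f : List Int → Int) (acc M : Option (List Int × Int)) (o : List Int) :
    pvComb (pvStepM f acc o) M = pvComb acc (pvComb (pvStepM f none o) M) := by
  rcases acc with _ | ⟨bo, bc⟩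
  · rw [pvComb_none_left]
  · rcases M with _ | ⟨so, sc⟩
    · rw [pvComb_none_right, pvComb_none_right]
      simp only [pvStepM, pvComb]
    · have e1 : pvStepM f none o = some (o, f o) := rfl
      have e2 : pvStepM f (some (bo, bc)) o
          = if f o < bc then some (o, f o) else some (bo, bc) := rfl
      have e3 : ∀ (a c : List Int) (b d : Int), pvComb (some (a, b)) (some (c, d))
          = if d < b then some (c, d) else some (a, b) := fun _ _ _ _ => rfl
      rw [e1, e2, e3]
      by_cases h2 : sc < f o <;> by_cases h1 : f o < bc <;>
        simp only [if_pos, h1, h2, ite_false] <;>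
          rw [e3] <;> rw [e3] <;>
            split_ifs <;> first | rfl | (exfalso; omega)

lemma pvFoldl_stepM_comb (f : List Int → Int) (l : List (List Int)) :
    ∀ acc, l.foldl (pvStepM f) acc = pvComb acc (l.foldl (pvStepM f) none) := by
  induction l with
  | nil => intro acc; rw [List.foldl_nil, List.foldl_nil, pvComb_none_right]
  | cons o l ih =>
      intro acc
      simp only [List.foldl_cons]
      rw [ih (pvStepM f acc o), ih (pvStepM f none o)]
      exact pvComb_step f acc _ o

lemma pvStepB_isSome (finca : List (Int × Int × Int)) (k : Nat) (t : Int)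
    (acc : Option (List Int × Int)) (jr : Int × List Int) :
    (pvStepB finca k t acc jr).isSome := by
  rcases acc with _ | ⟨bo, bc⟩
  · rfl
  · simp only [pvStepB]; split_ifs <;> rfl

lemma pvFoldl_stepB_isSome (finca : List (Int × Int × Int)) (k : Nat) (t : Int)
    (l : List (Int × List Int)) :
    ∀ acc, (acc : Option (List Int × Int)).isSome → (l.foldl (pvStepB finca k t) acc).isSome := by
  induction l with
  | nil => intro acc h; simpa using h
  | cons jr l ih => intro acc _; exact ih _ (pvStepB_isSome finca k t acc jr)

-- mapping a block (j :: ·) with cost shifted by pen commutes with the strict-min fold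
lemma pvStepM_map (g f : List Int → Int) (j : Int) (pen : Int)
    (hf : ∀ o, f (j :: o) = pen + g o) (L : List (List Int)) :
    ∀ a, (L.map (j :: ·)).foldl (pvStepM f) (Option.map (fun oc => (j :: oc.1, pen + oc.2)) a)
      = Option.map (fun oc => (j :: oc.1, pen + oc.2)) (L.foldl (pvStepM g) a) := by
  induction L with
  | nil => intro a; simp
  | cons o L ih =>
      intro a
      simp only [List.map_cons, List.foldl_cons]
      have hstep : pvStepM f (Option.map (fun oc => (j :: oc.1, pen + oc.2)) a) (j :: o)
          = Option.map (fun oc => (j :: oc.1, pen + oc.2)) (pvStepM g a o) := by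
        rcases a with _ | ⟨bo, bc⟩
        · simp [pvStepM, hf]
        · simp only [pvStepM, Option.map_some, hf]
          by_cases hlt : g o < bc
          · rw [if_pos hlt, if_pos (by omega)]; rfl
          · rw [if_neg hlt, if_neg (by omega)]; rfl
      rw [hstep, ih]

lemma pvSelections_length : ∀ (l : List Int) (jr : Int × List Int),
    jr ∈ pvSelections l → jr.2.length + 1 = l.length := by
  intro l
  induction l with
  | nil => intro jr h; simp [pvSelections] at h
  | cons x xs ih =>
      intro jr h
      simp only [pvSelections, List.mem_cons, List.mem_map] at h
      rcases h with h | ⟨jr', hmem, rfl⟩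
      · subst h; simp
      · have := ih jr' hmem; simp only [List.length_cons]; simp at this ⊢; omega

-- MAIN: the brute-force strict-min fold over all permutations of rem (costs from time t)
-- returns exactly B's DP value.
lemma pvMain (finca : List (Int × Int × Int)) :
    ∀ (k : Nat) (rem : List Int) (t : Int), rem.length = k →
      (pvPermsF k rem).foldl (pvStepM (pvCostFrom finca t)) none
        = some (pvBestF finca k rem t) := by
  intro k
  induction k with
  | zero =>
      intro rem t hlen
      rw [List.length_eq_zero_iff] at hlen; subst hlen
      rfl
  | succ k ih =>
      intro rem t hlen
      rcases rem with _ | ⟨x, xs⟩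
      · simp at hlen
      have hxs : xs.length = k := by simpa using hlen
      -- one block (all permutations starting with jr.1) folds to one pvStepB comparison
      have hblock : ∀ (jr : Int × List Int), jr.2.length = k → ∀ acc,
          ((pvPermsF k jr.2).map (jr.1 :: ·)).foldl (pvStepM (pvCostFrom finca t)) acc
            = pvStepB finca k t acc jr := by
        intro jr hlen' acc
        have hmap : ((pvPermsF k jr.2).map (jr.1 :: ·)).foldl (pvStepM (pvCostFrom finca t)) none
            = Option.map (fun oc => (jr.1 :: oc.1,
                (PySem.List.pyGetD finca jr.1 (0,0,0)).2.2 *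
                  max 0 (t + (PySem.List.pyGetD finca jr.1 (0,0,0)).2.1 -
                    (PySem.List.pyGetD finca jr.1 (0,0,0)).1) + oc.2))
              ((pvPermsF k jr.2).foldl
                (pvStepM (pvCostFrom finca (t + (PySem.List.pyGetD finca jr.1 (0,0,0)).2.1))) none) := by
          simpa using pvStepM_map
            (pvCostFrom finca (t + (PySem.List.pyGetD finca jr.1 (0,0,0)).2.1))
            (pvCostFrom finca t) jr.1
            ((PySem.List.pyGetD finca jr.1 (0,0,0)).2.2 *
              max 0 (t + (PySem.List.pyGetD finca jr.1 (0,0,0)).2.1 -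
                (PySem.List.pyGetD finca jr.1 (0,0,0)).1))
            (fun o => pvCostFrom_cons finca t jr.1 o) (pvPermsF k jr.2) none
        rw [pvFoldl_stepM_comb, hmap, ih jr.2 _ hlen']
        rcases acc with _ | ⟨bo, bc⟩
        · rw [pvComb_none_left]; rfl
        · rfl
      -- fold over the flatMap of blocks = fold of pvStepB over the selections
      have inner : ∀ (sels : List (Int × List Int)),
          (∀ jr ∈ sels, jr.2.length = k) → ∀ acc,
          ((sels.flatMap (fun jr => (pvPermsF k jr.2).map (jr.1 :: ·))).foldl
              (pvStepM (pvCostFrom finca t)) acc)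
            = sels.foldl (pvStepB finca k t) acc := by
        intro sels
        induction sels with
        | nil => intro _ acc; rfl
        | cons jr sels ihs =>
            intro hmem acc
            simp only [List.flatMap_cons, List.foldl_append, List.foldl_cons]
            rw [hblock jr (hmem jr List.mem_cons_self) acc,
              ihs (fun y hy => hmem y (List.mem_cons_of_mem _ hy))]
      have hsel : ∀ jr ∈ pvSelections (x :: xs), jr.2.length = k := by
        intro jr h
        have := pvSelections_length (x :: xs) jr h
        simp only [List.length_cons] at this; omega
      have hsome : ((pvSelections (x :: xs)).foldl (pvStepB finca k t) none).isSome := by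
        rw [show pvSelections (x :: xs)
            = (x, xs) :: (pvSelections xs).map (fun jr => (jr.1, x :: jr.2)) from rfl,
          List.foldl_cons]
        exact pvFoldl_stepB_isSome finca k t _ _ (pvStepB_isSome finca k t none (x, xs))
      obtain ⟨v, hv⟩ := Option.isSome_iff_exists.mp hsome
      have hfold := inner (pvSelections (x :: xs)) hsel none
      show ((pvSelections (x :: xs)).flatMap
          (fun jr => (pvPermsF k jr.2).map (jr.1 :: ·))).foldl
          (pvStepM (pvCostFrom finca t)) none = some (pvBestF finca (k+1) (x :: xs) t)
      rw [hfold, hv, show pvBestF finca (k+1) (x :: xs) t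
          = ((pvSelections (x :: xs)).foldl (pvStepB finca k t) none).getD ([], 0) from rfl, hv]
      rfl

-- ===== VERDICT (by name: the statement is the Claim_ definition above) =====
theorem roFB_spec : Claim_equal_roFB := by
  intro finca _
  unfold Spec_roFB
  have hlen : (PySem.List.pyRange 0 (finca.length : Int) 1).length = finca.length := by
    rw [PySem.List.length_pyRange_one]; simp
  show ((pyPermutations (PySem.List.pyRange 0 (finca.length : Int) 1)).foldl
      (pvStepM (pvCostFrom finca 0)) none).getD ([], 0) = roFB_alt finca
  rw [pyPermutations, hlen,
    pvMain finca finca.length (PySem.List.pyRange 0 (finca.length : Int) 1) 0 hlen]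
  rfl
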